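-- pv_equiv track=rewrite | github.com/SapoPy/Analisis-Equipos-Pokemon | pokemon.py | get_spread
-- ===== SOURCE A (Python) =====
-- def get_spread(linea1, linea2):
--     """
--     Entrega el EV spread y naturaleza en el formato Nature HP/Atk/Def/SpA/SpD/Spe
--     """
--     nature = ""
--     spread = ""
--     for i in range(len(linea2)):
--         if linea2[i] == " ":
--             nature = linea2[:i]
--             break
--
--     def search_stat(stat:str, linea: str) -> str:
--         elemntos = linea.split()
--         for i in range(len(elemntos)):
--             if elemntos[i] == stat:
--                 return elemntos[i-1]
--         return "0"
--     spread += nature + " " + search_stat("HP", linea1) +"/" + search_stat("Atk", linea1)+"/" + search_stat("Def", linea1)+"/" + search_stat("SpA", linea1)+"/"+ search_stat("SpD", linea1) +"/"+ search_stat("Spe", linea1)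
--
--     return spread
-- ===== SOURCE B (Python) =====
-- STATS = ("HP", "Atk", "Def", "SpA", "SpD", "Spe")
--
-- def get_spread(linea1, linea2):
--     idx = linea2.find(" ")
--     nature = linea2[:idx] if idx != -1 else ""
--     tokens = linea1.split()
--     prev = {}
--     for i, tok in enumerate(tokens):
--         if tok in STATS and tok not in prev:
--             prev[tok] = tokens[i - 1]
--     return nature + " " + "/".join(prev.get(s, "0") for s in STATS)
-- ===== Notes on version B (the rewrite author's own statement) =====
-- stated objective: faster
-- what changed: A scans the token list once per stat (six passes) and finds the nature with a manual index loop; B tokenizes once, builds in a single pass a dict from each stat name to its preceding token, and joins the six dict lookups, using str.find for the nature.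
import Mathlib
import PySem

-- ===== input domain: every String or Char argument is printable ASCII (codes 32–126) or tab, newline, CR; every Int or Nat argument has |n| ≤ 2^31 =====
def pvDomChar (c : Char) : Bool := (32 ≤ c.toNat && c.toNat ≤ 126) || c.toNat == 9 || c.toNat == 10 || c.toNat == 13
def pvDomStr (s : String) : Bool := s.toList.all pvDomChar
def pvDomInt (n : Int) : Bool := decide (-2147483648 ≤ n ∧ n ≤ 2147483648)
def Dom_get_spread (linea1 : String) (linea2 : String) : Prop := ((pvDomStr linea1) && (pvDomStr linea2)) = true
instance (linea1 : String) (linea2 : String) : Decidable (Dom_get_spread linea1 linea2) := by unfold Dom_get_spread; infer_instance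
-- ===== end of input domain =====

-- B replaces A's six per-stat scans of the token list by one tokenization and one single
-- pass building a dict stat ↦ preceding token, joining the six lookups (objective: faster, constant factor).

-- ===== PORT A =====
-- A's nature loop: for i in range(len(linea2)): if linea2[i] == " ": nature = linea2[:i]; break
def pvNatureLoop (linea2 : String) : List Char → Nat → String
  | [], _ => ""
  | c :: cs, i => if c = ' ' then PySem.Str.slice linea2 none (some (i : Int)) else pvNatureLoop linea2 cs (i + 1)

-- A's search_stat inner loop: for i in range(len(elemntos)): if elemntos[i] == stat: return elemntos[i-1]
-- (elemntos[i-1] is in range whenever the branch fires — the list is nonempty — so .getD "" is never used)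
def pvSearchLoop (stat : String) (elemntos : List String) : List String → Nat → String
  | [], _ => "0"
  | e :: rest, i => if e = stat then (PySem.List.pyGet? elemntos ((i : Int) - 1)).getD "" else pvSearchLoop stat elemntos rest (i + 1)

def pvSearchStat (stat : String) (linea : String) : String :=
  pvSearchLoop stat (PySem.Str.split₀ linea) (PySem.Str.split₀ linea) 0

def get_spread (linea1 : String) (linea2 : String) : String :=
  let nature := pvNatureLoop linea2 linea2.toList 0
  nature ++ " " ++ pvSearchStat "HP" linea1 ++ "/" ++ pvSearchStat "Atk" linea1 ++ "/" ++
    pvSearchStat "Def" linea1 ++ "/" ++ pvSearchStat "SpA" linea1 ++ "/" ++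
    pvSearchStat "SpD" linea1 ++ "/" ++ pvSearchStat "Spe" linea1

-- ===== PORT B =====
def pvStats : List String := ["HP", "Atk", "Def", "SpA", "SpD", "Spe"]

-- B's single pass: for i, tok in enumerate(tokens): if tok in STATS and tok not in prev: prev[tok] = tokens[i-1]
-- (tokens[i-1] is always in range — tokens is nonempty inside the loop — so .getD "" is never used)
def pvBuildPrev (tokens : List String) : PySem.Dict String String :=
  (PySem.List.enumerate tokens 0).foldl
    (fun d p => if pvStats.contains p.2 && !(d.contains p.2)
                then d.insert p.2 ((PySem.List.pyGet? tokens (p.1 - 1)).getD "")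
                else d)
    PySem.Dict.empty

def get_spread_alt (linea1 : String) (linea2 : String) : String :=
  let idx := PySem.Str.find linea2 " "
  let nature := if idx ≠ -1 then PySem.Str.slice linea2 none (some idx) else ""
  let tokens := PySem.Str.split₀ linea1
  let prev := pvBuildPrev tokens
  nature ++ " " ++ PySem.Str.join "/" (pvStats.map (fun s => prev.getD s "0"))

-- ===== PRECONDITION & SPEC =====
def Spec_get_spread (linea1 : String) (linea2 : String) (out : String) : Prop := out = get_spread_alt linea1 linea2
instance (linea1 : String) (linea2 : String) (out : String) : Decidable (Spec_get_spread linea1 linea2 out) := by unfold Spec_get_spread; infer_instance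

-- ===== CLAIM (what is proved, stated in full; the proofs are below) =====
def Claim_equal_get_spread : Prop := ∀ (linea1 : String) (linea2 : String), Dom_get_spread linea1 linea2 → Spec_get_spread linea1 linea2 (get_spread linea1 linea2)

-- ===== LEMMAS AND PROOFS =====

-- A's nature loop, characterised by the first index of ' ' in the remaining chars.
theorem pvNatureLoop_eq_findIdx? (s : String) : ∀ (cs : List Char) (i : Nat),
    pvNatureLoop s cs i =
      match List.findIdx? (· == ' ') cs with
      | some n => PySem.Str.slice s none (some ((n + i : Nat) : Int))
      | none => ""
  | [], i => rfl
  | c :: cs, i => by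
    rw [pvNatureLoop, List.findIdx?_cons]
    by_cases hc : c = ' '
    · simp [hc]
    · simp only [beq_iff_eq, if_neg hc, pvNatureLoop_eq_findIdx? s cs (i + 1)]
      cases h : List.findIdx? (· == ' ') cs with
      | none => simp
      | some n => simp [Nat.add_assoc, Nat.add_comm 1 i]

-- str.find with the one-char needle " " is that same first index of ' ' (or -1).
theorem pvFind_space_eq_findIdx? (cs : List Char) :
    PySem.Chars.find cs [' '] =
      match List.findIdx? (· == ' ') cs with
      | some n => (n : Int)
      | none => -1 := by
  have hpre : ∀ (j : Nat), [' '] <+: cs.drop j ↔ cs[j]? = some ' ' := by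
    intro j
    constructor
    · rintro ⟨t, ht⟩
      rw [← List.head?_drop, ← ht]; rfl
    · intro h
      rw [← List.head?_drop] at h
      cases hd : cs.drop j with
      | nil => rw [hd] at h; simp at h
      | cons x xs =>
        rw [hd] at h; simp at h
        exact ⟨xs, by simp [h]⟩
  cases h : List.findIdx? (· == ' ') cs with
  | none =>
    have hmem : ' ' ∉ cs := List.idxOf?_eq_none_iff.mp h
    exact (PySem.Chars.find_eq_neg_one_iff cs [' ']).mpr
      (fun hin => hmem ((List.singleton_infix_iff ' ' cs).mp hin))
  | some n =>
    show PySem.Chars.find cs [' '] = (n : Int)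
    obtain ⟨hn, h1, h2⟩ := List.findIdx?_eq_some_iff_getElem.mp h
    have hmem : ' ' ∈ cs := by
      have : cs[n] = ' ' := (beq_iff_eq.mp h1)
      exact this ▸ List.getElem_mem hn
    have hge : 0 ≤ PySem.Chars.find cs [' '] :=
      (PySem.Chars.find_nonneg_iff cs [' ']).mpr ((List.singleton_infix_iff ' ' cs).mpr hmem)
    obtain ⟨hat, hmin⟩ := PySem.Chars.find_spec hge
    set m := (PySem.Chars.find cs [' ']).toNat with hm
    have hatm : cs[m]? = some ' ' := (hpre m).mp hat
    have hmn : m = n := by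
      rcases Nat.lt_trichotomy m n with hlt | he | hgt
      · exfalso
        have hmlt : m < cs.length := Nat.lt_trans hlt hn
        have hnot : ¬ ((· == ' ') cs[m]) = true := h2 m hlt
        rw [List.getElem?_eq_getElem hmlt] at hatm
        simp at hatm hnot
        exact hnot hatm
      · exact he
      · exact absurd ((hpre n).mpr (by rw [List.getElem?_eq_getElem hn]; simp [beq_iff_eq.mp h1]))
          (hmin n hgt)
    have := Int.toNat_of_nonneg hge
    omega

-- The two natures agree.
theorem pvNature_eq (linea2 : String) :
    pvNatureLoop linea2 linea2.toList 0 =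
      (if PySem.Str.find linea2 " " ≠ -1 then PySem.Str.slice linea2 none (some (PySem.Str.find linea2 " ")) else "") := by
  have hfind : PySem.Str.find linea2 " " = PySem.Chars.find linea2.toList [' '] := by
    simp [PySem.Str.find_eq]
  rw [pvNatureLoop_eq_findIdx? linea2 linea2.toList 0, hfind, pvFind_space_eq_findIdx? linea2.toList]
  cases h : List.findIdx? (· == ' ') linea2.toList with
  | none => simp
  | some n =>
    have : ((n : Int)) ≠ -1 := by omega
    simp [this]

-- Invariant of B's single dict-building pass, against A's per-stat scan.
theorem pvBuild_inv (tokens : List String) (s : String) (hs : pvStats.contains s = true) :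
    ∀ (rest : List String) (k : Nat) (d : PySem.Dict String String),
    ((PySem.List.enumerate rest (k : Int)).foldl
      (fun d p => if pvStats.contains p.2 && !(d.contains p.2)
                  then d.insert p.2 ((PySem.List.pyGet? tokens (p.1 - 1)).getD "")
                  else d) d).getD s "0" =
      if d.contains s then d.getD s "0" else pvSearchLoop s tokens rest k
  | [], k, d => by
    cases hc : d.contains s with
    | true => simp [PySem.List.enumerate]
    | false => simp [PySem.List.enumerate, pvSearchLoop, PySem.Dict.getD_of_not_contains d "0" hc]
  | e :: rest, k, d => by
    rw [PySem.List.enumerate_cons, List.foldl_cons]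
    have hcast : (k : Int) + 1 = ((k + 1 : Nat) : Int) := by push_cast; ring
    rw [hcast, pvBuild_inv tokens s hs rest (k + 1) _]
    by_cases he : e = s
    · subst he
      cases hc : d.contains e with
      | true => simp [hc]
      | false =>
        have hmem : e ∈ pvStats := by simpa using hs
        simp [hmem, pvSearchLoop, PySem.Dict.contains_insert_self, PySem.Dict.getD_insert_self]
    · have hne : s ≠ e := fun hx => he hx.symm
      have hstep : pvSearchLoop s tokens (e :: rest) k = pvSearchLoop s tokens rest (k + 1) := by
        rw [pvSearchLoop, if_neg he]
      cases hg : (pvStats.contains e && !(d.contains e)) with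
      | false => simp [hstep]
      | true => simp [hstep, PySem.Dict.contains_insert, PySem.Dict.getD_insert, hne]

-- B's dict lookup equals A's scan, for each of the six stats.
theorem pvLookup_eq (tokens : List String) (s : String) (hs : pvStats.contains s = true) :
    (pvBuildPrev tokens).getD s "0" = pvSearchLoop s tokens tokens 0 := by
  rw [pvBuildPrev]
  have h := pvBuild_inv tokens s hs tokens 0 PySem.Dict.empty
  simpa [PySem.Dict.contains_empty] using h

-- "/".join of six strings is the sixfold concatenation.
theorem pvJoin6 (a b c d e f : String) :
    PySem.Str.join "/" [a, b, c, d, e, f] = a ++ "/" ++ b ++ "/" ++ c ++ "/" ++ d ++ "/" ++ e ++ "/" ++ f := by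
  apply String.toList_inj.mp
  simp [PySem.Str.join, PySem.Chars.join, List.intercalate]

-- ===== VERDICT (by name: the statement is the Claim_ definition above) =====
theorem get_spread_spec : Claim_equal_get_spread := by
  intro linea1 linea2 _
  unfold Spec_get_spread get_spread get_spread_alt
  rw [pvNature_eq linea2]
  have h : ∀ s, pvStats.contains s = true →
      (pvBuildPrev (PySem.Str.split₀ linea1)).getD s "0" = pvSearchStat s linea1 := by
    intro s hs; rw [pvSearchStat]; exact pvLookup_eq _ s hs
  simp only [pvStats, List.map]
  rw [pvJoin6, h "HP" (by decide), h "Atk" (by decide), h "Def" (by decide),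
    h "SpA" (by decide), h "SpD" (by decide), h "Spe" (by decide)]
  simp [String.append_assoc]
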